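-- pv_equiv track=rewrite | github.com/dapper91/contests | geeksforgeeks/phone-directory.py | find
-- ===== SOURCE A (Python) =====
-- def find(words, query):
--     result = []
--
--     cur_set = sorted(set(words))
--     for i in range(0, len(query)):
--         result.append([])
--
--         new_set = []
--         for word in cur_set:
--             if i < len(word) and word[i] == query[i]:
--                 result[-1].append(word)
--                 new_set.append(word)
--
--         cur_set = new_set
--
--     return result
-- ===== SOURCE B (Python) =====
-- def find(words, query):
--     s = sorted(set(words))
--     return [[w for w in s if w.startswith(query[:i + 1])] for i in range(len(query))]
-- ===== Notes on version B (the rewrite author's own statement) =====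
-- stated objective: simpler
-- what changed: Instead of threading a shrinking candidate set through the loop and comparing one character per level, B sorts the unique words once and independently selects, for each prefix query[:i+1], the words that start with it via startswith.
import Mathlib
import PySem

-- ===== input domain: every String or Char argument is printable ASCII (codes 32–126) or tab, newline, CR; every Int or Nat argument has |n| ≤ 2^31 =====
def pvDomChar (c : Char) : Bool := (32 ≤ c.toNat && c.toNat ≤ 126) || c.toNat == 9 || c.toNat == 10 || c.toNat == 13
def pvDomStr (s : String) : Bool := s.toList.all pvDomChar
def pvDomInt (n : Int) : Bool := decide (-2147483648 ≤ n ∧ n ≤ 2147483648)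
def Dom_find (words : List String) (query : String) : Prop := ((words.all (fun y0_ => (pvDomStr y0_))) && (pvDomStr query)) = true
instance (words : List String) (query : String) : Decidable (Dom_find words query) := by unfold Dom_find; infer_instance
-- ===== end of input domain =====

-- B replaces A's shrinking-candidate-set loop (one character comparison per surviving word per level) by an
-- independent startswith filter of the sorted unique words for each prefix of the query (simpler decomposition).


-- ===== PORT A =====
def find (words : List String) (query : String) : List (List String) :=
  let cur0 := PySem.List.sorted (PySem.Set.ofList words) (fun x => x) false
  let st := (PySem.List.pyRange 0 (PySem.Str.len query) 1).foldl
    (fun (st : List (List String) × List String) i =>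
      let p := st.2.foldl
        (fun (p : List String × List String) word =>
          if decide (i < PySem.Str.len word) && (PySem.Str.pyGet? word i == PySem.Str.pyGet? query i)
          then (p.1 ++ [word], p.2 ++ [word]) else p)
        ([], [])
      (st.1 ++ [p.1], p.2))
    ([], cur0)
  st.1

-- ===== PORT B =====
def find_alt (words : List String) (query : String) : List (List String) :=
  let s := PySem.List.sorted (PySem.Set.ofList words) (fun x => x) false
  (PySem.List.pyRange 0 (PySem.Str.len query) 1).map
    (fun i => s.filter (fun w => PySem.Str.startswith w (PySem.Str.slice query none (some (i + 1)))))

-- ===== PRECONDITION & SPEC =====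
def Spec_find (words : List String) (query : String) (out : List (List String)) : Prop := out = find_alt words query
instance (words : List String) (query : String) (out : List (List String)) : Decidable (Spec_find words query out) := by unfold Spec_find; infer_instance

-- ===== CLAIM (what is proved, stated in full; the proofs are below) =====
def Claim_equal_find : Prop := ∀ (words : List String) (query : String), Dom_find words query → Spec_find words query (find words query)

-- ===== LEMMAS AND PROOFS =====
theorem prefix_snoc_iff (l ws : List Char) (c : Char) : l ++ [c] <+: ws ↔ l <+: ws ∧ ws[l.length]? = some c := by
  constructor
  · rintro ⟨t, rfl⟩
    refine ⟨⟨[c] ++ t, by simp⟩, ?_⟩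
    simp
  · rintro ⟨⟨t, rfl⟩, h⟩
    rw [List.getElem?_append_right (by omega)] at h
    simp at h
    obtain ⟨t', rfl⟩ : ∃ t', t = c :: t' := by
      cases t with
      | nil => simp at h
      | cons a t' => simp at h; exact ⟨t', by rw [h]⟩
    exact ⟨t', by simp⟩

theorem step_eq (q w : String) (a : Nat) (ha : a < q.toList.length) :
    ((decide ((a : Int) < PySem.Str.len w) && (PySem.Str.pyGet? w (a : Int) == PySem.Str.pyGet? q (a : Int)))
      && PySem.Chars.startswith w.toList (q.toList.take a))
    = PySem.Chars.startswith w.toList (q.toList.take (a + 1)) := by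
  have hq : q.toList[a]? = some q.toList[a] := List.getElem?_eq_getElem ha
  rw [Bool.eq_iff_iff]
  simp only [Bool.and_eq_true, decide_eq_true_eq, PySem.Str.pyGet?_natCast, PySem.Str.len_eq,
    beq_iff_eq, PySem.Chars.startswith_iff]
  rw [List.take_add_one, hq]
  simp only [Option.toList_some]
  rw [prefix_snoc_iff]
  have hl : (q.toList.take a).length = a := by rw [List.length_take]; omega
  rw [hl]
  constructor
  · rintro ⟨⟨_, hget⟩, hpre⟩
    exact ⟨hpre, hget⟩
  · rintro ⟨hpre, hget⟩
    have : a < w.toList.length := by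
      rcases List.getElem?_eq_some_iff.mp hget with ⟨h, _⟩
      exact h
    exact ⟨⟨by exact_mod_cast this, hget⟩, hpre⟩

theorem pairFold (c : String → Bool) (xs : List String) (init : List String × List String) :
    xs.foldl (fun p w => if c w then (p.1 ++ [w], p.2 ++ [w]) else p) init
    = (init.1 ++ xs.filter c, init.2 ++ xs.filter c) := by
  induction xs generalizing init with
  | nil => simp
  | cons x xs ih =>
    simp only [List.foldl_cons, List.filter_cons]
    by_cases h : c x = true <;> simp [h, ih]

theorem mainLem (q : String) (s : List String) :
    ∀ (d a : Nat) (res : List (List String)), a + d = q.toList.length →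
    (PySem.List.pyRange (a : Int) (q.toList.length : Int) 1).foldl
      (fun (st : List (List String) × List String) i =>
        (st.1 ++ [(st.2.foldl
          (fun (p : List String × List String) word =>
            if decide (i < PySem.Str.len word) && (PySem.Str.pyGet? word i == PySem.Str.pyGet? q i)
            then (p.1 ++ [word], p.2 ++ [word]) else p)
          ([], [])).1],
         (st.2.foldl
          (fun (p : List String × List String) word =>
            if decide (i < PySem.Str.len word) && (PySem.Str.pyGet? word i == PySem.Str.pyGet? q i)
            then (p.1 ++ [word], p.2 ++ [word]) else p)
          ([], [])).2))
      (res, s.filter (fun w => PySem.Chars.startswith w.toList (q.toList.take a)))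
    = (res ++ (PySem.List.pyRange (a : Int) (q.toList.length : Int) 1).map
        (fun i => s.filter (fun w => PySem.Chars.startswith w.toList (q.toList.take (i.toNat + 1)))),
       s.filter (fun w => PySem.Chars.startswith w.toList (q.toList.take q.toList.length))) := by
  intro d
  induction d with
  | zero =>
    intro a res ha
    have h0 : a = q.toList.length := by omega
    subst h0
    rw [PySem.List.pyRange_one_eq_nil le_rfl]
    simp
  | succ d ih =>
    intro a res ha
    have hlt : (a : Int) < (q.toList.length : Int) := by exact_mod_cast (by omega : a < q.toList.length)
    rw [PySem.List.pyRange_one_cons hlt]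
    simp only [List.foldl_cons, List.map_cons]
    rw [pairFold]
    dsimp only
    simp only [List.nil_append]
    have hstep : List.filter
        (fun word => decide ((a : Int) < PySem.Str.len word) && (PySem.Str.pyGet? word (a : Int) == PySem.Str.pyGet? q (a : Int)))
        (List.filter (fun w => PySem.Chars.startswith w.toList (q.toList.take a)) s)
        = List.filter (fun w => PySem.Chars.startswith w.toList (q.toList.take (a + 1))) s := by
      rw [List.filter_filter]
      exact List.filter_congr (fun w _ => step_eq q w a (by omega))
    rw [hstep]
    have hcast : ((a : Int) + 1) = ((a + 1 : Nat) : Int) := by push_cast; ring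
    rw [hcast, ih (a + 1) (res ++ [s.filter (fun w => PySem.Chars.startswith w.toList (q.toList.take (a + 1)))]) (by omega)]
    simp [Int.toNat_natCast]

theorem find_eq_find_alt (words : List String) (query : String) : find words query = find_alt words query := by
  unfold find find_alt
  dsimp only
  rw [PySem.Str.len_eq query]
  have h0 : PySem.List.sorted (PySem.Set.ofList words) (fun x => x) false
      = (PySem.List.sorted (PySem.Set.ofList words) (fun x => x) false).filter
        (fun w => PySem.Chars.startswith w.toList (query.toList.take 0)) := by
    rw [List.filter_congr (fun w _ => ?_), List.filter_true]
    simp [PySem.Chars.startswith_iff]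
  conv_lhs => rw [h0]
  rw [show (0 : Int) = ((0 : Nat) : Int) from rfl]
  rw [mainLem query (PySem.List.sorted (PySem.Set.ofList words) (fun x => x) false) query.toList.length 0 [] (by omega)]
  simp only [List.nil_append]
  apply List.map_congr_left
  intro i hi
  rw [PySem.List.mem_pyRange_one] at hi
  congr 1
  funext w
  rw [PySem.Str.startswith_eq, PySem.Str.toList_slice]
  simp only [PySem.Chars.slice_eq_listSlice]
  have : (i + 1) = ((i.toNat + 1 : Nat) : Int) := by omega
  rw [this, PySem.List.slice_to_natCast]

-- ===== VERDICT (by name: the statement is the Claim_ definition above) =====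
theorem find_spec : Claim_equal_find := by
  intro words query _
  unfold Spec_find
  exact find_eq_find_alt words query
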